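-- pv_equiv track=rewrite | github.com/importantinfoalex-lang/Code-Hub | homebase.py | apply_cooldown
-- ===== SOURCE A (Python) =====
-- def apply_cooldown(raw_signal, cooldown):
--     final_signal = []
--     in_position = 0
--     cool = 0
--     for sig in raw_signal:
--         if cool > 0:
--             final_signal.append(in_position)
--             cool -= 1
--             continue
--         if sig == 1 and in_position == 0:
--             in_position = 1
--             cool = cooldown
--         elif sig == 0 and in_position == 1:
--             in_position = 0
--             cool = cooldown
--         final_signal.append(in_position)
--     return final_signal
-- ===== SOURCE B (Python) =====
-- def apply_cooldown(raw_signal, cooldown):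
--     n = len(raw_signal)
--     out = []
--     pos = 0
--     i = 0
--     while i < n:
--         sig = raw_signal[i]
--         if sig == 1 and pos == 0:
--             pos = 1
--             k = min(max(cooldown, 0), n - i - 1)
--         elif sig == 0 and pos == 1:
--             pos = 0
--             k = min(max(cooldown, 0), n - i - 1)
--         else:
--             k = 0
--         out += [pos] * (k + 1)
--         i += k + 1
--     return out
-- ===== Notes on version B (the rewrite author's own statement) =====
-- stated objective: alternative
-- what changed: Replaces A's per-element state machine with a decrementing cool counter by block emission: at each decision point the block length is computed in closed form (min(max(cooldown,0), remaining)) and the held position is emitted as one replicated block, skipping the cooled-down elements entirely.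
import Mathlib
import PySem

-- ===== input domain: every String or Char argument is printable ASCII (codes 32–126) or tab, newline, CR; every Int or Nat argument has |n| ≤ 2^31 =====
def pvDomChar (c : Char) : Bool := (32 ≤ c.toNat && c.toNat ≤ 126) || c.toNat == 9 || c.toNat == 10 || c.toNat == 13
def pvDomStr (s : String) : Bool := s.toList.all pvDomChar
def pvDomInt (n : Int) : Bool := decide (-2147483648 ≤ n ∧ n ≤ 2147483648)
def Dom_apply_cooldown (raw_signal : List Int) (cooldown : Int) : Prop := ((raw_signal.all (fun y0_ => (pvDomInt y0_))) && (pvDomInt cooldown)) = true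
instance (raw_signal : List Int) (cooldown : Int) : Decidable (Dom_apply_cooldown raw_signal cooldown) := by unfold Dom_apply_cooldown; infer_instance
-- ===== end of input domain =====

-- B replaces A's per-element cooldown counter by block emission: each decision point
-- computes its block length in closed form and replicates the held position (alternative, same cost).


-- ===== PORT A =====
-- acStep = the body of A's for-loop over the state (final_signal, in_position, cool)
def acStep (cooldown : Int) (st : List Int × Int × Int) (sig : Int) : List Int × Int × Int :=
  let (final, pos, cool) := st
  if cool > 0 then (final ++ [pos], pos, cool - 1)
  else if sig = 1 ∧ pos = 0 then (final ++ [1], 1, cooldown)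
  else if sig = 0 ∧ pos = 1 then (final ++ [0], 0, cooldown)
  else (final ++ [pos], pos, cool)

def apply_cooldown (raw_signal : List Int) (cooldown : Int) : List Int :=
  (raw_signal.foldl (acStep cooldown) ([], 0, 0)).1

-- ===== PORT B =====
-- acBlocks = B's `while i < n` loop: the suffix from i is the list argument, `i += k+1` is `drop k`
-- on the tail, `out += [pos]*(k+1)` is the replicated block.
def acBlocks (cooldown : Int) : List Int → Int → List Int
  | [], _ => []
  | sig :: rest, pos =>
    if sig = 1 ∧ pos = 0 then
      let k := min (max cooldown 0).toNat rest.length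
      List.replicate (k + 1) 1 ++ acBlocks cooldown (rest.drop k) 1
    else if sig = 0 ∧ pos = 1 then
      let k := min (max cooldown 0).toNat rest.length
      List.replicate (k + 1) 0 ++ acBlocks cooldown (rest.drop k) 0
    else pos :: acBlocks cooldown rest pos
  termination_by xs _ => xs.length
  decreasing_by all_goals (simp [List.length_drop]; try omega)

def apply_cooldown_alt (raw_signal : List Int) (cooldown : Int) : List Int :=
  acBlocks cooldown raw_signal 0

-- ===== PRECONDITION & SPEC =====
def Spec_apply_cooldown (raw_signal : List Int) (cooldown : Int) (out : List Int) : Prop := out = apply_cooldown_alt raw_signal cooldown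
instance (raw_signal : List Int) (cooldown : Int) (out : List Int) : Decidable (Spec_apply_cooldown raw_signal cooldown out) := by unfold Spec_apply_cooldown; infer_instance

-- ===== CLAIM (what is proved, stated in full; the proofs are below) =====
def Claim_equal_apply_cooldown : Prop := ∀ (raw_signal : List Int) (cooldown : Int), Dom_apply_cooldown raw_signal cooldown → Spec_apply_cooldown raw_signal cooldown (apply_cooldown raw_signal cooldown)

-- ===== LEMMAS AND PROOFS =====

-- draining the cooldown: from a state with cool = c ≥ 0, A's fold appends pos for
-- min c.toNat xs.length steps and continues on the dropped suffix
theorem fold_drain (cooldown : Int) (xs : List Int) : ∀ (acc : List Int) (pos c : Int), 0 ≤ c →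
    xs.foldl (acStep cooldown) (acc, pos, c)
      = (xs.drop (min c.toNat xs.length)).foldl (acStep cooldown)
          (acc ++ List.replicate (min c.toNat xs.length) pos, pos, c - min c.toNat xs.length) := by
  induction xs with
  | nil => intro acc pos c _; simp
  | cons sig rest ih =>
    intro acc pos c hc
    by_cases h0 : c > 0
    · have hct : c.toNat = (c - 1).toNat + 1 := by omega
      have hmin : min c.toNat (sig :: rest).length = min (c - 1).toNat rest.length + 1 := by
        rw [List.length_cons, hct, Nat.succ_min_succ]
      have hstep : acStep cooldown (acc, pos, c) sig = (acc ++ [pos], pos, c - 1) := by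
        simp [acStep, h0]
      have hrep : acc ++ List.replicate (min (c - 1).toNat rest.length + 1) pos
          = (acc ++ [pos]) ++ List.replicate (min (c - 1).toNat rest.length) pos := by
        rw [List.replicate_succ]; simp
      rw [List.foldl_cons, hstep, ih (acc ++ [pos]) pos (c - 1) (by omega), hmin, hrep,
        List.drop_succ_cons]
      have hsub : (c : Int) - ((min (c - 1).toNat rest.length + 1 : Nat) : Int)
          = c - 1 - ((min (c - 1).toNat rest.length : Nat) : Int) := by push_cast; omega
      rw [hsub]
    · have hc0 : c = 0 := by omega
      simp [hc0]

-- main invariant: from a drained counter (c ≤ 0), A's fold produces acc ++ B's blocks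
theorem fold_eq_blocks (cooldown : Int) : ∀ (n : Nat) (xs : List Int), xs.length = n →
    ∀ (acc : List Int) (pos c : Int), c ≤ 0 →
    (xs.foldl (acStep cooldown) (acc, pos, c)).1 = acc ++ acBlocks cooldown xs pos := by
  intro n
  induction n using Nat.strong_induction_on with
  | _ n ih =>
    intro xs hlen acc pos c hc
    cases xs with
    | nil => simp [acBlocks]
    | cons sig rest =>
      simp only [List.length_cons] at hlen
      have hnc : ¬ c > 0 := by omega
      by_cases h1 : sig = 1 ∧ pos = 0
      · have hstep : acStep cooldown (acc, pos, c) sig = (acc ++ [1], 1, cooldown) := by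
          simp [acStep, hnc, h1]
        by_cases hcd : cooldown ≤ 0
        · have hm : max cooldown 0 = 0 := by omega
          have hk0 : min (max cooldown 0).toNat rest.length = 0 := by simp [hm]
          rw [List.foldl_cons, hstep,
            ih rest.length (by omega) rest rfl (acc ++ [1]) 1 cooldown hcd]
          rw [acBlocks]
          simp [h1, hk0]
        · have hmax0 : max cooldown 0 = cooldown := by omega
          set k := min cooldown.toNat rest.length with hk
          have hkk : min (max cooldown 0).toNat rest.length = k := by rw [hmax0]
          have hdrain := fold_drain cooldown rest (acc ++ [1]) 1 cooldown (by omega)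
          rw [List.foldl_cons, hstep, hdrain, ← hk]
          by_cases hk2 : (cooldown : Int) - k ≤ 0
          · rw [ih (rest.length - k) (by omega) (rest.drop k) (by simp)
              (acc ++ [1] ++ List.replicate k 1) 1 (cooldown - k) hk2]
            rw [acBlocks]
            simp [h1, hkk, List.replicate_succ, List.append_assoc]
          · have hklen : k = rest.length := by omega
            rw [hklen, List.drop_length]
            rw [acBlocks]
            simp [h1, hkk, hklen, List.drop_length, acBlocks, List.replicate_succ,
              List.append_assoc]
      · by_cases h2 : sig = 0 ∧ pos = 1
        · have hstep : acStep cooldown (acc, pos, c) sig = (acc ++ [0], 0, cooldown) := by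
            simp [acStep, hnc, h2]
          by_cases hcd : cooldown ≤ 0
          · have hm : max cooldown 0 = 0 := by omega
            have hk0 : min (max cooldown 0).toNat rest.length = 0 := by simp [hm]
            rw [List.foldl_cons, hstep,
              ih rest.length (by omega) rest rfl (acc ++ [0]) 0 cooldown hcd]
            rw [acBlocks]
            simp [h2, hk0]
          · have hmax0 : max cooldown 0 = cooldown := by omega
            set k := min cooldown.toNat rest.length with hk
            have hkk : min (max cooldown 0).toNat rest.length = k := by rw [hmax0]
            have hdrain := fold_drain cooldown rest (acc ++ [0]) 0 cooldown (by omega)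
            rw [List.foldl_cons, hstep, hdrain, ← hk]
            by_cases hk2 : (cooldown : Int) - k ≤ 0
            · rw [ih (rest.length - k) (by omega) (rest.drop k) (by simp)
                (acc ++ [0] ++ List.replicate k 0) 0 (cooldown - k) hk2]
              rw [acBlocks]
              simp [h2, hkk, List.replicate_succ, List.append_assoc]
            · have hklen : k = rest.length := by omega
              rw [hklen, List.drop_length]
              rw [acBlocks]
              simp [h2, hkk, hklen, List.drop_length, acBlocks, List.replicate_succ,
                List.append_assoc]
        · have hstep : acStep cooldown (acc, pos, c) sig = (acc ++ [pos], pos, c) := by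
            simp [acStep, hnc, h1, h2]
          rw [List.foldl_cons, hstep,
            ih rest.length (by omega) rest rfl (acc ++ [pos]) pos c hc]
          rw [acBlocks]
          simp [h1, h2]

-- ===== VERDICT (by name: the statement is the Claim_ definition above) =====
theorem apply_cooldown_spec : Claim_equal_apply_cooldown := by
  intro raw_signal cooldown _
  show apply_cooldown raw_signal cooldown = apply_cooldown_alt raw_signal cooldown
  rw [apply_cooldown, apply_cooldown_alt,
    fold_eq_blocks cooldown raw_signal.length raw_signal rfl [] 0 0 le_rfl]
  simp
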